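-- pv_equiv track=rewrite | github.com/sferekides/CollageIt | Collage_It.py | determine_length_of_image
-- ===== SOURCE A (Python) =====
-- def determine_length_of_image(user_input):
--     total = 9
--     for charac in user_input :
--         if charac==' ':
--             total+=2
--         else :
--             total+=6
--     return total
-- ===== SOURCE B (Python) =====
-- def determine_length_of_image(user_input):
--     s = user_input.count(' ')
--     return 9 + 6 * len(user_input) - 4 * s
-- ===== Notes on version B (the rewrite author's own statement) =====
-- stated objective: faster
-- what changed: Replaced the per-character Python loop and branch with a closed form 9 + 6*len - 4*spaces computed from len() and the built-in space count.
import Mathlib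
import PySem

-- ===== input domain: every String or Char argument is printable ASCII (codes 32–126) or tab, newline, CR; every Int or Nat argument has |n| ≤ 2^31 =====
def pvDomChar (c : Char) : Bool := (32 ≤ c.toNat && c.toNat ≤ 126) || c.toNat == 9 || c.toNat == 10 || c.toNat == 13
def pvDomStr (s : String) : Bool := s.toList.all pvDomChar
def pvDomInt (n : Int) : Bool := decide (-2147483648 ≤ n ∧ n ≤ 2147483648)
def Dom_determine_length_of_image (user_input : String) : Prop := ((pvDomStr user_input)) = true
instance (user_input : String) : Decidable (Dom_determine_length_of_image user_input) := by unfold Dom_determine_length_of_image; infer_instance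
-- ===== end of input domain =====

-- B replaces A's per-character accumulation loop with a closed form 9 + 6*len - 4*spaces (objective: simpler).

-- ===== PORT A =====
-- total = 9; for charac in user_input: total += 2 if charac == ' ' else 6; return total
def determine_length_of_image (user_input : String) : Int :=
  user_input.toList.foldl (fun total charac => if charac = ' ' then total + 2 else total + 6) 9

-- ===== PORT B =====
-- s = user_input.count(' '); return 9 + 6*len(user_input) - 4*s
def determine_length_of_image_alt (user_input : String) : Int :=
  let s : Int := (PySem.Str.count user_input " " : Int)
  9 + 6 * PySem.Str.len user_input - 4 * s

-- ===== PRECONDITION & SPEC =====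
def Spec_determine_length_of_image (user_input : String) (out : Int) : Prop := out = determine_length_of_image_alt user_input
instance (user_input : String) (out : Int) : Decidable (Spec_determine_length_of_image user_input out) := by unfold Spec_determine_length_of_image; infer_instance

-- ===== CLAIM (what is proved, stated in full; the proofs are below) =====
def Claim_equal_determine_length_of_image : Prop := ∀ (user_input : String), Dom_determine_length_of_image user_input → Spec_determine_length_of_image user_input (determine_length_of_image user_input)

-- ===== LEMMAS AND PROOFS =====

-- the single-character substring count of ' ' is the character count of spaces
theorem count_go_space (cs : List Char) : ∀ acc, PySem.Chars.count.go [' '] cs.length cs acc = acc + cs.countP (· == ' ') := by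
  induction cs with
  | nil => intro acc; simp [PySem.Chars.count.go]
  | cons c cs ih =>
    intro acc
    by_cases hc : c = ' '
    · subst hc
      simp only [List.length_cons, PySem.Chars.count.go, List.countP_cons]
      simp [List.isPrefixOf, ih]; omega
    · simp only [List.length_cons, PySem.Chars.count.go, List.countP_cons]
      have h1 : ([' '].isPrefixOf (c :: cs)) = false := by
        simp [List.isPrefixOf]; exact fun e => hc e.symm
      have h2 : (c == ' ') = false := by simpa using hc
      simp [h1, h2, ih]

-- A's loop, characterised in closed form
theorem foldl_closed (cs : List Char) : ∀ t : Int,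
    cs.foldl (fun total charac => if charac = ' ' then total + 2 else total + 6) t
      = t + 6 * cs.length - 4 * cs.countP (· == ' ') := by
  induction cs with
  | nil => intro t; simp
  | cons c cs ih =>
    intro t
    by_cases hc : c = ' '
    · have h2 : (c == ' ') = true := by simpa using hc
      simp [List.foldl_cons, hc, ih]; ring
    · have h2 : (c == ' ') = false := by simpa using hc
      simp [List.foldl_cons, hc, h2, ih]; ring

-- ===== VERDICT (by name: the statement is the Claim_ definition above) =====
theorem determine_length_of_image_spec : Claim_equal_determine_length_of_image := by
  intro s _
  unfold Spec_determine_length_of_image determine_length_of_image determine_length_of_image_alt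
  rw [foldl_closed, PySem.Str.count_eq, PySem.Str.len]
  have hsub : (" " : String).toList = [' '] := by decide
  rw [hsub]
  have : PySem.Chars.count s.toList [' '] = PySem.Chars.count.go [' '] s.toList.length s.toList 0 := by
    simp [PySem.Chars.count]
  rw [this, count_go_space]
  push_cast
  ring
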